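-- pv_equiv track=rewrite | github.com/Draam1988/Rafting_secretar | RaftSecretary/raftsecretary/domain/parallel_sprint.py | build_stage_one_pairs
-- ===== SOURCE A (Python) =====
-- def main_bracket_size(team_count: int) -> int:
--     if team_count < 3:
--         raise ValueError("Parallel sprint requires at least 3 teams")
--
--     size = 2
--     while size * 2 <= team_count:
--         size *= 2
--     return size
--
-- def stage_one_team_count(team_count: int) -> int:
--     bracket_size = main_bracket_size(team_count)
--     return max(0, 2 * (team_count - bracket_size))
--
-- def build_stage_one_pairs(sprint_order: list[str]) -> list[tuple[str, str]]:
--     count = stage_one_team_count(len(sprint_order))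
--     if count == 0:
--         return []
--
--     stage_one_teams = sprint_order[-count:]
--     return [
--         (stage_one_teams[index], stage_one_teams[-(index + 1)])
--         for index in range(count // 2)
--     ]
-- ===== SOURCE B (Python) =====
-- def build_stage_one_pairs(sprint_order: list[str]) -> list[tuple[str, str]]:
--     n = len(sprint_order)
--     if n < 3:
--         raise ValueError("Parallel sprint requires at least 3 teams")
--
--     def largest_pow2(m: int) -> int:
--         # largest power of two <= m, by recursive halving
--         return 1 if m < 2 else 2 * largest_pow2(m // 2)
--
--     # two pointers walking inward over the play-in region; no tail slice is taken
--     i = n - 2 * (n - largest_pow2(n))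
--     j = n - 1
--     pairs = []
--     while i < j:
--         pairs.append((sprint_order[i], sprint_order[j]))
--         i += 1
--         j -= 1
--     return pairs
-- ===== Notes on version B (the rewrite author's own statement) =====
-- stated objective: alternative
-- what changed: B replaces A's doubling while-loop with a recursive-halving computation of the largest power of two <= n, and replaces A's tail slice plus indexed comprehension over range(count//2) (positive/negative indexing into the slice) with an iterative two-pointer walk moving inward over sprint_order itself, taking no slice at all.
import Mathlib
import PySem

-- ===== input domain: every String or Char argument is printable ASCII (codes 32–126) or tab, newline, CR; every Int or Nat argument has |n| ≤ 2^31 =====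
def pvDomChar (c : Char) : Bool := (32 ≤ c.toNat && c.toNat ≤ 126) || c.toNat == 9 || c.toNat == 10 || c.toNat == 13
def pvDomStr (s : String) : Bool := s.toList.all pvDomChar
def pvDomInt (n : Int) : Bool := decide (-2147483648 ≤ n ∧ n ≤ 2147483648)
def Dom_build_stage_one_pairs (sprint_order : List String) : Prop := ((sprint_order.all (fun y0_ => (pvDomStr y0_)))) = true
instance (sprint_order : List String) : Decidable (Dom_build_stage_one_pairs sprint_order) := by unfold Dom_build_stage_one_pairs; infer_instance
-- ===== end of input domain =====

-- B computes the largest power of two <= n by recursive halving (instead of A's doubling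
-- while-loop) and builds the pairs with two pointers walking inward over sprint_order itself
-- (no tail slice), instead of A's slice + indexed comprehension — alternative.

-- ===== PORT A =====
-- while size * 2 <= team_count: size *= 2   (fuel tc.toNat suffices: size starts at 2 and doubles)
def pvMbLoop (tc : Int) : Nat → Int → Int
  | 0, size => size
  | fuel + 1, size => if size * 2 ≤ tc then pvMbLoop tc fuel (size * 2) else size

def pvMainBracketSize (tc : Int) : Int :=
  if tc < 3 then 0  -- Python raises ValueError here; these inputs are excluded by Pre_
  else pvMbLoop tc tc.toNat 2

def pvStageOneTeamCount (tc : Int) : Int :=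
  max 0 (2 * (tc - pvMainBracketSize tc))

def build_stage_one_pairs (sprint_order : List String) : List (String × String) :=
  let count := pvStageOneTeamCount (sprint_order.length : Int)
  if count = 0 then []
  else
    let stage_one_teams := PySem.List.slice sprint_order (some (-count)) none
    (PySem.List.pyRange 0 (PySem.Int.floordiv count 2) 1).map
      (fun index => (PySem.List.pyGetD stage_one_teams index "",
                     PySem.List.pyGetD stage_one_teams (-(index + 1)) ""))

-- ===== PORT B =====
-- largest power of two <= m, by recursive halving  (Source B's largest_pow2)
def pvPow2Rec (m : Nat) : Nat :=
  if m < 2 then 1 else 2 * pvPow2Rec (m / 2)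
termination_by m
decreasing_by omega

-- while i < j: append (xs[i], xs[j]); i += 1; j -= 1   (Source B's two-pointer loop)
def pvPairLoop (xs : List String) (i j : Int) : List (String × String) :=
  if i < j then
    (PySem.List.pyGetD xs i "", PySem.List.pyGetD xs j "") :: pvPairLoop xs (i + 1) (j - 1)
  else []
termination_by (j - i).toNat
decreasing_by omega

def build_stage_one_pairs_alt (sprint_order : List String) : List (String × String) :=
  let n := sprint_order.length
  if n < 3 then []  -- Python raises ValueError here; these inputs are excluded by Pre_
  else pvPairLoop sprint_order ((n : Int) - 2 * ((n : Int) - (pvPow2Rec n : Int))) ((n : Int) - 1)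

-- ===== PRECONDITION & SPEC =====
-- A raises ValueError ("requires at least 3 teams") on fewer than 3 teams; Pre_ excludes exactly those inputs.
def Pre_build_stage_one_pairs (sprint_order : List String) : Prop :=
  3 ≤ sprint_order.length
instance (sprint_order : List String) : Decidable (Pre_build_stage_one_pairs sprint_order) := by
  unfold Pre_build_stage_one_pairs; infer_instance

def pvWitness_build_stage_one_pairs : List String := ["a", "b", "c"]

def Spec_build_stage_one_pairs (sprint_order : List String) (out : List (String × String)) : Prop := out = build_stage_one_pairs_alt sprint_order
instance (sprint_order : List String) (out : List (String × String)) : Decidable (Spec_build_stage_one_pairs sprint_order out) := by unfold Spec_build_stage_one_pairs; infer_instance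

-- ===== CLAIM (what is proved, stated in full; the proofs are below) =====
def Claim_equal_build_stage_one_pairs : Prop := ∀ (sprint_order : List String), Dom_build_stage_one_pairs sprint_order → Pre_build_stage_one_pairs sprint_order → Spec_build_stage_one_pairs sprint_order (build_stage_one_pairs sprint_order)

-- ===== LEMMAS AND PROOFS =====

-- A's doubling loop, started at 2^j, lands on 2^(bitLength n - 1) given enough fuel.
lemma pvMbLoop_eq_pow (n : Nat) (hn : 3 ≤ n) :
    ∀ (fuel j : Nat), 1 ≤ j → 2 ^ j ≤ n → PySem.Int.bitLength (n : Int) - 1 ≤ fuel + j →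
    pvMbLoop (n : Int) fuel ((2 ^ j : Nat) : Int) = ((2 ^ (PySem.Int.bitLength (n : Int) - 1) : Nat) : Int) := by
  have hne : (n : Int) ≠ 0 := by omega
  have hup : n < 2 ^ PySem.Int.bitLength (n : Int) := by
    have := PySem.Int.lt_two_pow_bitLength (n : Int)
    simpa using this
  intro fuel
  induction fuel with
  | zero =>
    intro j hj h2 hb
    have hjb : j < PySem.Int.bitLength (n : Int) := by
      by_contra h
      have : 2 ^ PySem.Int.bitLength (n : Int) ≤ 2 ^ j := Nat.pow_le_pow_right (by norm_num) (by omega)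
      omega
    have : j = PySem.Int.bitLength (n : Int) - 1 := by omega
    simp [pvMbLoop, this]
  | succ fuel ih =>
    intro j hj h2 hb
    simp only [pvMbLoop]
    by_cases hcase : 2 ^ (j + 1) ≤ n
    · have hcond : ((2 ^ j : Nat) : Int) * 2 ≤ (n : Int) := by
        rw [Nat.pow_succ] at hcase
        exact_mod_cast hcase
      rw [if_pos hcond]
      have harg : ((2 ^ j : Nat) : Int) * 2 = ((2 ^ (j + 1) : Nat) : Int) := by push_cast; ring
      rw [harg]
      exact ih (j + 1) (by omega) hcase (by omega)
    · have hlow := PySem.Int.two_pow_bitLength_le (n : Int) hne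
      simp only [Int.natAbs_natCast] at hlow
      have hjb : j < PySem.Int.bitLength (n : Int) := by
        by_contra h
        have : 2 ^ PySem.Int.bitLength (n : Int) ≤ 2 ^ j := Nat.pow_le_pow_right (by norm_num) (by omega)
        omega
      have hjb2 : PySem.Int.bitLength (n : Int) - 1 ≤ j := by
        by_contra h
        have : j + 1 ≤ PySem.Int.bitLength (n : Int) - 1 := by omega
        have : 2 ^ (j+1) ≤ 2 ^ (PySem.Int.bitLength (n : Int) - 1) := Nat.pow_le_pow_right (by norm_num) this
        omega
      have hcond : ¬ ((2 ^ j : Nat) : Int) * 2 ≤ (n : Int) := by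
        rw [Nat.pow_succ] at hcase
        exact_mod_cast hcase
      rw [if_neg hcond]
      have : j = PySem.Int.bitLength (n : Int) - 1 := by omega
      rw [this]

-- A's comprehension over the tail xs[a:] (of length 2k) equals the indexed range map.
lemma pvPairsA_eq (xs : List String) (a k : Nat) (hlen : xs.length = a + 2 * k) :
    (PySem.List.pyRange 0 (k : Int) 1).map
      (fun index => (PySem.List.pyGetD (xs.drop a) index "", PySem.List.pyGetD (xs.drop a) (-(index + 1)) ""))
    = (List.range k).map (fun i => (xs.getD (a + i) "", xs.getD (a + 2 * k - 1 - i) "")) := by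
  have hdlen : (xs.drop a).length = 2 * k := by simp [hlen]
  apply List.ext_getElem
  · simp [PySem.List.length_pyRange_one]
  · intro i h1 h2
    have hik : i < k := by simpa [PySem.List.length_pyRange_one] using h1
    simp only [List.getElem_map, List.getElem_range, PySem.List.getElem_pyRange_one, zero_add]
    refine congrArg₂ _ ?_ ?_
    · rw [PySem.List.pyGetD_natCast, List.getD_eq_getElem _ _ (by omega),
          List.getD_eq_getElem _ _ (by omega), List.getElem_drop]
    · have hcast : (-((i : Int) + 1)) = -(((i + 1 : Nat)) : Int) := by push_cast; ring
      rw [hcast, PySem.List.pyGetD_neg_natCast _ _ _ (by omega) (by omega),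
          List.getD_eq_getElem _ _ (by omega), List.getElem_drop]
      congr 1
      omega

-- B's recursive halving returns a power of two 2^j with 2^j <= m < 2^(j+1).
lemma pvPow2Rec_spec : ∀ m : Nat, 1 ≤ m →
    ∃ j : Nat, pvPow2Rec m = 2 ^ j ∧ 2 ^ j ≤ m ∧ m < 2 ^ (j + 1) := by
  intro m
  induction m using Nat.strong_induction_on with
  | _ m ih =>
    intro hm
    rw [pvPow2Rec]
    by_cases h : m < 2
    · refine ⟨0, ?_⟩
      rw [if_pos h]
      norm_num
      omega
    · rw [if_neg h]
      obtain ⟨j, hj1, hj2, hj3⟩ := ih (m / 2) (by omega) (by omega)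
      refine ⟨j + 1, ?_, ?_, ?_⟩
      · rw [hj1]; ring
      · have : 2 ^ (j + 1) = 2 * 2 ^ j := by ring
        omega
      · have : 2 ^ (j + 1 + 1) = 2 * 2 ^ (j + 1) := by ring
        omega

-- B's two-pointer loop over segment [a, a+2k) yields the indexed pairs.
lemma pvPairLoop_eq : ∀ (k : Nat) (xs : List String) (a : Nat),
    pvPairLoop xs (a : Int) ((a : Int) + 2 * (k : Int) - 1) =
    (List.range k).map (fun i => (xs.getD (a + i) "", xs.getD (a + 2 * k - 1 - i) "")) := by
  intro k
  induction k with
  | zero =>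
    intro xs a
    rw [pvPairLoop, if_neg (by omega)]
    simp
  | succ k ih =>
    intro xs a
    rw [pvPairLoop, if_pos (by omega)]
    have h1 : (a : Int) + 1 = ((a + 1 : Nat) : Int) := by omega
    have h2 : (a : Int) + 2 * ((k + 1 : Nat) : Int) - 1 - 1 = ((a + 1 : Nat) : Int) + 2 * (k : Int) - 1 := by
      push_cast; ring
    rw [h2, h1, ih xs (a + 1)]
    have h3 : (a : Int) + 2 * ((k + 1 : Nat) : Int) - 1 = ((a + 2 * k + 1 : Nat) : Int) := by
      push_cast; ring
    rw [h3, PySem.List.pyGetD_natCast, PySem.List.pyGetD_natCast,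
        List.range_succ_eq_map, List.map_cons, List.map_map]
    refine congrArg₂ _ ?_ ?_
    · refine congrArg₂ _ ?_ ?_ <;> congr 1
    · apply List.map_congr_left
      intro i _
      simp only [Function.comp]
      refine congrArg₂ _ ?_ ?_ <;> · congr 1; omega

-- Main equality on the precondition's domain.
lemma pvMainEq (xs : List String) (hpre : 3 ≤ xs.length) :
    build_stage_one_pairs xs = build_stage_one_pairs_alt xs := by
  set n := xs.length with hn
  set b := PySem.Int.bitLength (n : Int) with hb
  have hup : n < 2 ^ b := by
    have := PySem.Int.lt_two_pow_bitLength (n : Int); simpa using this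
  have hlow : 2 ^ (b - 1) ≤ n := by
    have := PySem.Int.two_pow_bitLength_le (n : Int) (by omega); simpa using this
  have hb2 : 2 ≤ b := by
    by_contra h
    have : 2 ^ b ≤ 2 ^ 1 := Nat.pow_le_pow_right (by norm_num) (by omega)
    simp at this; omega
  set B := 2 ^ (b - 1) with hB
  have h2B : n < 2 * B := by
    have : 2 ^ b = 2 * 2 ^ (b - 1) := by
      rw [← Nat.pow_succ']
      congr 1
      omega
    omega
  set k := n - B with hk
  have h2k : 2 * k ≤ n := by omega
  -- A's bracket size
  have mbs : pvMainBracketSize (n : Int) = (B : Int) := by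
    unfold pvMainBracketSize
    rw [if_neg (by omega)]
    have hfuel : (n : Int).toNat = n := Int.toNat_natCast n
    rw [hfuel]
    have h1 : ((2 : Int)) = ((2 ^ 1 : Nat) : Int) := by norm_num
    rw [h1]
    apply pvMbLoop_eq_pow n hpre n 1 (le_refl 1) (by omega)
    have : b - 1 < 2 ^ (b - 1) := Nat.lt_two_pow_self
    omega
  have hc : pvStageOneTeamCount (n : Int) = ((2 * k : Nat) : Int) := by
    unfold pvStageOneTeamCount
    rw [mbs]
    rw [max_eq_right (by omega)]
    push_cast
    omega
  -- B's recursive halving also lands on B = 2^(b-1)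
  have hpow : pvPow2Rec n = B := by
    obtain ⟨j, hj1, hj2, hj3⟩ := pvPow2Rec_spec n (by omega)
    have hjb : j = b - 1 := by
      by_contra hne
      rcases Nat.lt_or_ge j (b - 1) with hlt | hge
      · have : 2 ^ (j + 1) ≤ 2 ^ (b - 1) := Nat.pow_le_pow_right (by norm_num) (by omega)
        omega
      · have hgt : b - 1 < j := by omega
        have : 2 ^ b ≤ 2 ^ j := Nat.pow_le_pow_right (by norm_num) (by omega)
        omega
    rw [hj1, hjb]
  unfold build_stage_one_pairs build_stage_one_pairs_alt
  simp only [← hn, hc, hpow]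
  rw [if_neg (show ¬ n < 3 from by omega)]
  by_cases hk0 : k = 0
  · rw [if_pos (by simp [hk0])]
    rw [pvPairLoop, if_neg (by omega)]
  · rw [if_neg (by push_cast; omega)]
    -- A's tail xs[-2k:] is xs.drop (n - 2k)
    have htail : PySem.List.slice xs (some (-((2 * k : Nat) : Int))) none = xs.drop (n - 2 * k) := by
      rw [PySem.List.slice_from_neg_natCast xs (2 * k) (by omega)]
    have hdiv : PySem.Int.floordiv ((2 * k : Nat) : Int) 2 = ((k : Nat) : Int) := by
      have := PySem.Int.floordiv_natCast (2 * k) 2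
      rw [show ((2 : Nat) : Int) = (2 : Int) by norm_num] at this
      rw [this]
      congr 1
      omega
    rw [htail, hdiv, pvPairsA_eq xs (n - 2 * k) k (by omega)]
    -- B's two-pointer loop over [n-2k, n) gives the same indexed range map
    have hstart : (n : Int) - 2 * ((n : Int) - (B : Int)) = ((n - 2 * k : Nat) : Int) := by omega
    have hend : (n : Int) - 1 = ((n - 2 * k : Nat) : Int) + 2 * (k : Int) - 1 := by omega
    rw [hstart, hend, pvPairLoop_eq k xs (n - 2 * k)]

-- ===== VERDICT (by name: the statement is the Claim_ definition above) =====
theorem build_stage_one_pairs_spec : Claim_equal_build_stage_one_pairs := by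
  intro sprint_order _ hpre
  exact pvMainEq sprint_order hpre
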